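-- pv_equiv track=rewrite | github.com/dropfred/AoC | aoc-2025-python/day_01.py | part_2
-- ===== SOURCE A (Python) =====
-- START = 50
--
-- def part_2(puzzle):
--     code = 0
--     distance = START
--     for d in puzzle:
--         pp, distance = distance, (distance + d) % 100
--         code += abs(d) // 100
--         if (distance == 0) or (pp != 0) and ((d < 0 and distance > pp) or (d > 0 and distance < pp)):
--             code += 1
--     return code
-- ===== SOURCE B (Python) =====
-- START = 50
--
-- def part_2(puzzle):
--     code = 0
--     s = START
--     for d in puzzle:
--         if d > 0:
--             code += (s + d) // 100 - s // 100
--         elif d < 0: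
--             code += (s - 1) // 100 - (s + d - 1) // 100
--         s += d
--     return code
-- ===== Notes on version B (the rewrite author's own statement) =====
-- stated objective: alternative
-- what changed: B tracks the absolute running position and counts the multiples of 100 reached in each move with a closed-form floor-division difference, replacing A's mod-100 distance tracking with abs(d)//100 plus a landing/wraparound flag.
-- intended difference: On inputs containing a step whose starting position and whose rotation are both multiples of 100 (including a zero rotation while sitting on a multiple), A's unguarded distance==0 flag counts one extra event per such step beyond the positions actually reached, so A returns B's value plus the number of such steps; B's per-position crossing count is the intended value. — e.g. on part_2([50, 100]): A returns 3, B returns 2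
import Mathlib
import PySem

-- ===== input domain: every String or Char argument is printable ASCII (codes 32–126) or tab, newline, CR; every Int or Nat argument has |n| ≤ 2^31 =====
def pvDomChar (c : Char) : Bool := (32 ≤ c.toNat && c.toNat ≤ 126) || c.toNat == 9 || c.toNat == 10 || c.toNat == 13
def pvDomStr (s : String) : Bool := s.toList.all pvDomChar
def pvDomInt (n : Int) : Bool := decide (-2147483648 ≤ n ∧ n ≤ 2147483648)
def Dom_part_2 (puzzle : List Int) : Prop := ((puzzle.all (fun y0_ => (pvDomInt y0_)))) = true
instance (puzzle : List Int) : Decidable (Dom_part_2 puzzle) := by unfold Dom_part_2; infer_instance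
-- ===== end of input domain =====

-- B replaces A's mod-100 distance tracking and landing/wraparound-flag condition by a running
-- absolute position with a per-step closed-form floor-division count of the multiples of 100
-- reached (objective: alternative; A's value differs on the D_ corner stated below).

-- ===== PORT A =====
-- state: (code, distance)
def pvStepA (st : Int × Int) (d : Int) : Int × Int :=
  let pp := st.2
  let distance := PySem.Int.mod (st.2 + d) 100
  let code := st.1 + PySem.Int.floordiv |d| 100
  let code := if distance = 0 ∨ (pp ≠ 0 ∧ ((d < 0 ∧ pp < distance) ∨ (d > 0 ∧ distance < pp))) then code + 1 else code
  (code, distance)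

def part_2 (puzzle : List Int) : Int :=
  (puzzle.foldl pvStepA (0, 50)).1

-- ===== PORT B =====
-- state: (code, absolute position s)
def pvStepB (st : Int × Int) (d : Int) : Int × Int :=
  let s := st.2
  let code := st.1 +
    (if 0 < d then PySem.Int.floordiv (s + d) 100 - PySem.Int.floordiv s 100
     else if d < 0 then PySem.Int.floordiv (s - 1) 100 - PySem.Int.floordiv (s + d - 1) 100
     else 0)
  (code, s + d)

def part_2_alt (puzzle : List Int) : Int :=
  (puzzle.foldl pvStepB (0, 50)).1

-- ===== PRECONDITION & SPEC =====
-- On inputs containing a step whose starting position and rotation are both multiples of 100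
-- (including a zero rotation while sitting on a multiple), A's unguarded distance==0 flag counts
-- one extra event per such step beyond the positions actually reached, so A returns B's value plus
-- the number of such steps; B's per-position crossing count is the intended value.
def pvDGuilty (s : Int) (l : List Int) : Bool :=
  match l with
  | [] => false
  | d :: t => (s % 100 == 0 && d % 100 == 0) || pvDGuilty (s + d) t

def D_part_2 (puzzle : List Int) : Prop := pvDGuilty 50 puzzle = true
instance (puzzle : List Int) : Decidable (D_part_2 puzzle) := by unfold D_part_2; infer_instance

def Spec_part_2 (puzzle : List Int) (out : Int) : Prop := ¬ D_part_2 puzzle → out = part_2_alt puzzle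
instance (puzzle : List Int) (out : Int) : Decidable (Spec_part_2 puzzle out) := by unfold Spec_part_2; infer_instance

def pvDiffWitness_part_2 : List Int := [50, 100]
def pvDiffWitnessOut_part_2 : Int × Int := (3, 2)

-- ===== CLAIM (what is proved, stated in full; the proofs are below) =====
def Claim_unchanged_part_2 : Prop := ∀ (puzzle : List Int), Dom_part_2 puzzle → Spec_part_2 puzzle (part_2 puzzle)
def Claim_changed_part_2 : Prop := Dom_part_2 (pvDiffWitness_part_2) ∧ D_part_2 (pvDiffWitness_part_2) ∧ part_2 (pvDiffWitness_part_2) = pvDiffWitnessOut_part_2.1 ∧ part_2_alt (pvDiffWitness_part_2) = pvDiffWitnessOut_part_2.2 ∧ pvDiffWitnessOut_part_2.1 ≠ pvDiffWitnessOut_part_2.2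
def Claim_exact_part_2 : Prop := ∀ (puzzle : List Int), Dom_part_2 puzzle → D_part_2 puzzle → part_2 puzzle ≠ part_2_alt puzzle

-- ===== LEMMAS AND PROOFS =====

-- number of "guilty" steps (start position and rotation both ≡ 0 mod 100) along the run
def pvExtra (s : Int) (l : List Int) : Int :=
  match l with
  | [] => 0
  | d :: t => (if s % 100 = 0 ∧ d % 100 = 0 then 1 else 0) + pvExtra (s + d) t

-- one step of A from the residue of s equals one step of B from s, plus the guilty-step extra
lemma pvStep_eq (c s d : Int) :
    pvStepA (c, PySem.Int.mod s 100) d =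
      ((pvStepB (c, s) d).1 + (if s % 100 = 0 ∧ d % 100 = 0 then 1 else 0),
        PySem.Int.mod (s + d) 100) := by
  have hm : ∀ a : Int, PySem.Int.mod a 100 = a % 100 :=
    fun a => PySem.Int.mod_eq_emod_of_pos (by norm_num)
  have hd : ∀ a : Int, PySem.Int.floordiv a 100 = a / 100 :=
    fun a => PySem.Int.floordiv_eq_ediv_of_pos (by norm_num)
  simp only [pvStepA, pvStepB, hm, hd, Int.abs_eq_natAbs, Prod.mk.injEq]
  constructor
  · split_ifs <;> omega
  · omega

-- the code accumulator of B's loop is additive in its starting value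
lemma pvShiftB (l : List Int) : ∀ c k s : Int,
    (l.foldl pvStepB (c + k, s)).1 = (l.foldl pvStepB (c, s)).1 + k := by
  induction l with
  | nil => intro c k s; rfl
  | cons d l ih =>
    intro c k s
    simp only [List.foldl_cons]
    have h : pvStepB (c + k, s) d = ((pvStepB (c, s) d).1 + k, s + d) := by
      simp only [pvStepB, Prod.mk.injEq]; constructor
      · ring
      · trivial
    rw [h, ih, show pvStepB (c, s) d = ((pvStepB (c, s) d).1, s + d) from rfl]

-- the whole loop: A's code from the residue = B's code from the absolute position + pvExtra
lemma pvLoop_eq (l : List Int) : ∀ c s : Int,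
    (l.foldl pvStepA (c, PySem.Int.mod s 100)).1 = (l.foldl pvStepB (c, s)).1 + pvExtra s l := by
  induction l with
  | nil => intro c s; simp [pvExtra]
  | cons d l ih =>
    intro c s
    simp only [List.foldl_cons, pvStep_eq, pvExtra]
    rw [ih, pvShiftB, show (pvStepB (c, s) d) = ((pvStepB (c, s) d).1, s + d) from rfl]
    ring

lemma pvExtra_nonneg (l : List Int) : ∀ s : Int, 0 ≤ pvExtra s l := by
  induction l with
  | nil => intro s; simp [pvExtra]
  | cons d l ih =>
    intro s
    have := ih (s + d)
    simp only [pvExtra]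
    split_ifs <;> omega

lemma pvExtra_pos_of_guilty (l : List Int) : ∀ s : Int, pvDGuilty s l = true → 0 < pvExtra s l := by
  induction l with
  | nil => intro s h; simp [pvDGuilty] at h
  | cons d l ih =>
    intro s h
    simp only [pvDGuilty, Bool.or_eq_true, Bool.and_eq_true, beq_iff_eq] at h
    have hn := pvExtra_nonneg l (s + d)
    simp only [pvExtra]
    rcases h with h | h
    · simp [h.1, h.2]; omega
    · have := ih (s + d) h
      split_ifs <;> omega

lemma pvExtra_zero_of_not_guilty (l : List Int) : ∀ s : Int, pvDGuilty s l = false → pvExtra s l = 0 := by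
  induction l with
  | nil => intro s _; rfl
  | cons d l ih =>
    intro s h
    simp only [pvDGuilty, Bool.or_eq_false_iff, Bool.and_eq_false_iff] at h
    simp only [pvExtra, ih (s + d) h.2]
    rcases h.1 with h1 | h1 <;> simp at h1 ⊢ <;> omega

lemma pvMain (l : List Int) : part_2 l = part_2_alt l + pvExtra 50 l := by
  unfold part_2 part_2_alt
  have h50 : ((0 : Int), (50 : Int)) = (0, PySem.Int.mod 50 100) := by decide
  rw [h50]
  exact pvLoop_eq l 0 50

-- ===== VERDICT (by name: the statement is the Claim_ definition above) =====
theorem part_2_spec : Claim_unchanged_part_2 := by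
  intro puzzle _ hD
  have hfalse : pvDGuilty 50 puzzle = false := by
    revert hD; unfold D_part_2; cases pvDGuilty 50 puzzle <;> simp
  rw [pvMain, pvExtra_zero_of_not_guilty puzzle 50 hfalse, add_zero]

theorem part_2_changed : Claim_changed_part_2 := by unfold Claim_changed_part_2; decide

theorem part_2_tight : Claim_exact_part_2 := by
  intro puzzle _ hD
  rw [pvMain]
  have := pvExtra_pos_of_guilty puzzle 50 hD
  omega
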